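-- pv_equiv track=rewrite | github.com/loganpowell/dict-typer | dict_typer/type_definitions.py | _should_treat_as_examples
-- ===== SOURCE A (Python) =====
-- from typing import Any, Dict, List, Optional, Set, Tuple, Type, Union
-- from collections import defaultdict
--
-- def _should_treat_as_examples(dicts: List[Dict[str, Any]]) -> bool:
--     """Determine if a list of dictionaries should be treated as multiple examples
--     of the same schema rather than a list of different items.
--
--     This function heuristically determines if the dictionaries have enough overlap
--     in their field names to suggest they represent variations of the same type.
--
--     Special case: If one of the dictionaries is empty and others have content,
--     treat as examples (the empty dict represents a case where all fields are optional).
--     """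
--     if len(dicts) < 2:
--         return False
--
--     # Special case: if we have exactly one empty dict and others with content,
--     # treat as examples where all fields should be optional
--     empty_dicts = [d for d in dicts if len(d) == 0]
--     non_empty_dicts = [d for d in dicts if len(d) > 0]
--
--     if len(empty_dicts) == 1 and len(non_empty_dicts) >= 1:
--         return True
--
--     # Get all field names from all dictionaries
--     all_fields = set()
--     field_counts = defaultdict(int)
--
--     for d in dicts:
--         for field in d.keys():
--             all_fields.add(field)
--             field_counts[field] += 1
--
--     if not all_fields:
--         return False
--
--     total_dicts = len(dicts)
--
--     # Count fields by their frequency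
--     core_fields = sum(1 for count in field_counts.values() if count == total_dicts)  # In all dicts
--     partial_fields = sum(1 for count in field_counts.values() if 1 < count < total_dicts)  # In some but not all
--     unique_fields = sum(1 for count in field_counts.values() if count == 1)  # In only one dict
--
--     # Key insight: If ALL fields appear in ALL dictionaries, it's likely a regular list
--     # If there are fields that appear in some but not all dictionaries, it's likely examples
--
--     if partial_fields == 0:
--         # No partial fields means either all fields are in all dicts (regular list)
--         # or all fields are unique to one dict (completely different structures)
--         return False
--
--     # We have partial fields, which suggests variations of the same schema
--     # Additional check: ensure we have some core schema (shared fields)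
--     # and that partial fields make up a reasonable portion
--
--     if core_fields == 0:
--         # No shared fields at all - probably completely different items
--         return False
--
--     # We have both core fields (shared) and partial fields (optional)
--     # This is a good indicator of schema variations
--     return True
-- ===== SOURCE B (Python) =====
-- def _should_treat_as_examples(dicts):
--     """Set-based reformulation: one pass maintaining `seen` (fields met so far),
--     `dup` (fields met in at least two dicts) and `inter` (fields common to all
--     dicts); 'examples' iff some shared core exists and some field is repeated
--     but not universal."""
--     if len(dicts) < 2:
--         return False
--
--     # same special case as before: exactly one empty dict among several
--     if sum(1 for d in dicts if not d) == 1: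
--         return True
--
--     seen = set()
--     dup = set()
--     inter = None
--     for d in dicts:
--         keys = set(d.keys())
--         dup |= keys & seen
--         seen |= keys
--         inter = keys if inter is None else inter & keys
--
--     return bool(dup - inter) and bool(inter)
-- ===== Notes on version B (the rewrite author's own statement) =====
-- stated objective: alternative
-- what changed: Replaces the defaultdict frequency-counting pass and the three per-count summations with a single pass maintaining membership sets (seen, duplicated, intersection-of-all), deriving the answer as bool(dup - inter) and bool(inter).
import Mathlib
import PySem

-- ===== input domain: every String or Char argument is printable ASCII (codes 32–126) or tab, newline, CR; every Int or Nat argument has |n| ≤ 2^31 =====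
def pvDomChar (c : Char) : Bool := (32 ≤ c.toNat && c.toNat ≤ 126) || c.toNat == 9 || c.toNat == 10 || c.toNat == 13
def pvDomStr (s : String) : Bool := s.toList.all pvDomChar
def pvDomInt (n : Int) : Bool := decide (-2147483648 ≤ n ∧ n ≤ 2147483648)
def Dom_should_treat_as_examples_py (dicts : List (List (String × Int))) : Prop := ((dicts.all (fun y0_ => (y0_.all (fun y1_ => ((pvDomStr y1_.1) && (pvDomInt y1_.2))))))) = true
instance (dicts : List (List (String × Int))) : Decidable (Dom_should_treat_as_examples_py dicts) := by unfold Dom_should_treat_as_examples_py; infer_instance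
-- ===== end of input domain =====

-- B replaces A's frequency-counting pass with set accumulation (seen/dup/intersection); same results, similar cost ("alternative").

-- ===== PORT A =====
def should_treat_as_examples_py (dicts : List (List (String × Int))) : Bool :=
  if dicts.length < 2 then false
  else
    let empty_dicts := dicts.filter (fun d => PySem.Set.len (PySem.Set.ofList (d.map Prod.fst)) == 0)
    let non_empty_dicts := dicts.filter (fun d => 0 < PySem.Set.len (PySem.Set.ofList (d.map Prod.fst)))
    if empty_dicts.length == 1 && decide (1 ≤ non_empty_dicts.length) then true
    else
      let st := dicts.foldl
        (fun (st : PySem.Set String × PySem.Dict String Int) d =>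
          (PySem.Set.ofList (d.map Prod.fst)).foldl
            (fun st f => (PySem.Set.add st.1 f, st.2.modify f 0 (· + 1))) st)
        (PySem.Set.empty, PySem.Dict.empty)
      let all_fields := st.1
      let field_counts := st.2
      if PySem.Set.len all_fields == 0 then false
      else
        let total_dicts : Int := dicts.length
        let core_fields := (field_counts.values.filter (fun c => c == total_dicts)).length
        let partial_fields := (field_counts.values.filter (fun c => 1 < c && c < total_dicts)).length
        let _unique_fields := (field_counts.values.filter (fun c => c == 1)).length
        if partial_fields == 0 then false
        else if core_fields == 0 then false
        else true

-- ===== PORT B =====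
def should_treat_as_examples_py_alt (dicts : List (List (String × Int))) : Bool :=
  if dicts.length < 2 then false
  else if dicts.countP (fun d => d.isEmpty) == 1 then true
  else
    let st := dicts.foldl
      (fun (st : PySem.Set String × PySem.Set String × Option (PySem.Set String)) d =>
        let keys := PySem.Set.ofList (d.map Prod.fst)
        (PySem.Set.union st.1 keys,
         PySem.Set.union st.2.1 (PySem.Set.inter keys st.1),
         some (match st.2.2 with | none => keys | some i => PySem.Set.inter i keys)))
      (PySem.Set.empty, PySem.Set.empty, none)
    match st.2.2 with
    | none => false
    | some inter => !(PySem.Set.diff st.2.1 inter).isEmpty && !inter.isEmpty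

-- ===== PRECONDITION & SPEC =====
def Spec_should_treat_as_examples_py (dicts : List (List (String × Int))) (out : Bool) : Prop := out = should_treat_as_examples_py_alt dicts
instance (dicts : List (List (String × Int))) (out : Bool) : Decidable (Spec_should_treat_as_examples_py dicts out) := by unfold Spec_should_treat_as_examples_py; infer_instance

-- ===== CLAIM (what is proved, stated in full; the proofs are below) =====
def Claim_equal_should_treat_as_examples_py : Prop := ∀ (dicts : List (List (String × Int))), Dom_should_treat_as_examples_py dicts → Spec_should_treat_as_examples_py dicts (should_treat_as_examples_py dicts)

-- ===== LEMMAS AND PROOFS =====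

def pvKs (d : List (String × Int)) : PySem.Set String := PySem.Set.ofList (d.map Prod.fst)
def pvCnt (dicts : List (List (String × Int))) (f : String) : Nat :=
  dicts.countP (fun d => decide (f ∈ pvKs d))

lemma pv_countP_not {α : Type} (p : α → Bool) (l : List α) :
    l.countP p + l.countP (fun x => !p x) = l.length := by
  induction l with
  | nil => simp
  | cons x t ih => by_cases h : p x <;> simp [List.countP_cons, h] <;> omega

lemma pv_foldl_flat {α β γ : Type} (l : List α) (g : α → List β)
    (step : γ → β → γ) (init : γ) :
    l.foldl (fun st d => (g d).foldl step st) init = (l.flatMap g).foldl step init := by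
  induction l generalizing init with
  | nil => rfl
  | cons d t ih => simp [List.foldl_append, ih]

lemma pv_count_flat (dicts : List (List (String × Int))) (f : String) :
    (dicts.flatMap pvKs).count f = pvCnt dicts f := by
  induction dicts with
  | nil => simp [pvCnt]
  | cons d t ih =>
    have hnd : (pvKs d).Nodup := PySem.Set.nodup_ofList _
    have hone : (pvKs d).count f = if f ∈ pvKs d then 1 else 0 := by
      by_cases h : f ∈ pvKs d
      · simp [h, List.count_eq_one_of_mem hnd h]
      · simp [h, List.count_eq_zero.mpr h]
    simp [List.count_append, ih, pvCnt, List.countP_cons, hone]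
    by_cases h : f ∈ pvKs d <;> simp [h] <;> omega

lemma pvCnt_eq_length_iff (dicts : List (List (String × Int))) (f : String) :
    pvCnt dicts f = dicts.length ↔ ∀ d ∈ dicts, f ∈ pvKs d := by
  simp [pvCnt, List.countP_eq_length]

def pvBstep (st : PySem.Set String × PySem.Set String × Option (PySem.Set String))
    (d : List (String × Int)) :
    PySem.Set String × PySem.Set String × Option (PySem.Set String) :=
  let keys := PySem.Set.ofList (d.map Prod.fst)
  (PySem.Set.union st.1 keys,
   PySem.Set.union st.2.1 (PySem.Set.inter keys st.1),
   some (match st.2.2 with | none => keys | some i => PySem.Set.inter i keys))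

lemma pvCnt_pos (t : List (List (String × Int))) (f : String) :
    1 ≤ pvCnt t f ↔ ∃ d ∈ t, f ∈ pvKs d := by
  rw [pvCnt, Nat.one_le_iff_ne_zero, ← Nat.pos_iff_ne_zero, List.countP_pos_iff]
  simp

lemma pv_bfold_char (l : List (List (String × Int))) (s u I : PySem.Set String) :
    (∀ f, f ∈ (l.foldl pvBstep (s, u, some I)).2.1 ↔
        f ∈ u ∨ (f ∈ s ∧ ∃ d ∈ l, f ∈ pvKs d) ∨ 2 ≤ pvCnt l f) ∧
    (∃ I', (l.foldl pvBstep (s, u, some I)).2.2 = some I' ∧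
        ∀ f, f ∈ I' ↔ f ∈ I ∧ ∀ d ∈ l, f ∈ pvKs d) := by
  induction l generalizing s u I with
  | nil =>
    refine ⟨fun f => by simp [pvCnt], I, rfl, fun f => by simp⟩
  | cons d t ih =>
    have hstep : (d :: t).foldl pvBstep (s, u, some I)
        = t.foldl pvBstep (PySem.Set.union s (pvKs d),
            PySem.Set.union u (PySem.Set.inter (pvKs d) s),
            some (PySem.Set.inter I (pvKs d))) := rfl
    rw [hstep]
    obtain ⟨h1, I', hI', h2⟩ := ih (PySem.Set.union s (pvKs d))
      (PySem.Set.union u (PySem.Set.inter (pvKs d) s)) (PySem.Set.inter I (pvKs d))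
    have hcnt : ∀ f, pvCnt (d :: t) f = (if f ∈ pvKs d then 1 else 0) + pvCnt t f := by
      intro f; by_cases h : f ∈ pvKs d <;>
        simp [pvCnt, h, Nat.add_comm]
    refine ⟨fun f => ?_, I', hI', fun f => ?_⟩
    · rw [h1 f]
      simp only [PySem.Set.mem_union, PySem.Set.mem_inter, List.mem_cons]
      have hp := pvCnt_pos t f
      by_cases hk : f ∈ pvKs d <;> by_cases hs : f ∈ s <;> simp [hk, hs]
      · rw [hcnt f, ← hp]
        by_cases hu : f ∈ u
        · simp [hu]
        · simp [hu, hk]; omega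
      · simp [hcnt f, hk]
      · simp [hcnt f, hk]
    · rw [h2 f]
      simp only [PySem.Set.mem_inter, List.mem_cons]
      constructor
      · rintro ⟨⟨hI, hk⟩, hall⟩
        exact ⟨hI, fun d' hd' => by rcases hd' with rfl | hd'; exact hk; exact hall d' hd'⟩
      · rintro ⟨hI, hall⟩
        exact ⟨⟨hI, hall d (Or.inl rfl)⟩, fun d' hd' => hall d' (Or.inr hd')⟩

lemma pvCnt_le (dicts : List (List (String × Int))) (f : String) :
    pvCnt dicts f ≤ dicts.length := List.countP_le_length

lemma pv_pred_empty (d : List (String × Int)) :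
    (PySem.Set.len (PySem.Set.ofList (d.map Prod.fst)) == 0) = d.isEmpty := by
  cases d with
  | nil => rfl
  | cons p t => simp [PySem.Set.len, PySem.Set.ofList_cons]; omega

theorem should_treat_as_examples_py_spec : Claim_equal_should_treat_as_examples_py := by
  intro dicts _
  unfold Spec_should_treat_as_examples_py
  unfold should_treat_as_examples_py should_treat_as_examples_py_alt
  by_cases hlen : dicts.length < 2
  · simp only [if_pos hlen]
  rw [if_neg hlen, if_neg hlen]
  simp only []
  obtain ⟨d0, rest, rfl⟩ : ∃ d0 rest, dicts = d0 :: rest := by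
    cases dicts with
    | nil => simp at hlen
    | cons d0 rest => exact ⟨d0, rest, rfl⟩
  -- the second guard of both ports agrees
  have hguard : (((d0 :: rest).filter (fun d => PySem.Set.len (PySem.Set.ofList (d.map Prod.fst)) == 0)).length == 1 &&
      decide (1 ≤ ((d0 :: rest).filter (fun d => decide (0 < PySem.Set.len (PySem.Set.ofList (d.map Prod.fst))))).length))
      = ((d0 :: rest).countP (fun d => d.isEmpty) == 1) := by
    have h1 : ((d0 :: rest).filter (fun d => PySem.Set.len (PySem.Set.ofList (d.map Prod.fst)) == 0)).length
        = (d0 :: rest).countP (fun d => d.isEmpty) := by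
      rw [← List.countP_eq_length_filter]
      exact List.countP_congr (fun d _ => by rw [pv_pred_empty d])
    have h2 : ((d0 :: rest).filter (fun d => decide (0 < PySem.Set.len (PySem.Set.ofList (d.map Prod.fst))))).length
        = (d0 :: rest).countP (fun d => !d.isEmpty) := by
      rw [← List.countP_eq_length_filter]
      refine List.countP_congr (fun d _ => ?_)
      cases d with
      | nil => rfl
      | cons p t =>
        simp [PySem.Set.len, PySem.Set.ofList_cons]
    rw [h1, h2]
    by_cases he : (d0 :: rest).countP (fun d => d.isEmpty) = 1
    · have hn := pv_countP_not (fun d => d.isEmpty) (d0 :: rest)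
      have : 1 ≤ (d0 :: rest).countP (fun d => !d.isEmpty) := by
        simp only at hn
        omega
      simp [he, this]
    · simp [he]
  rw [hguard]
  by_cases hg : ((d0 :: rest).countP (fun d => d.isEmpty) == 1) = true
  · rw [if_pos hg, if_pos hg]
  rw [if_neg hg, if_neg hg]
  have hn2 : 2 ≤ (d0 :: rest).length := by omega
  -- A's double loop = set-of-all-fields + counter over the concatenated key lists
  have hfold : (d0 :: rest).foldl
      (fun (st : PySem.Set String × PySem.Dict String Int) d =>
        (PySem.Set.ofList (d.map Prod.fst)).foldl
          (fun st f => (PySem.Set.add st.1 f, st.2.modify f 0 (· + 1))) st)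
      (PySem.Set.empty, PySem.Dict.empty)
      = (PySem.Set.ofList ((d0 :: rest).flatMap pvKs),
         PySem.Dict.counter ((d0 :: rest).flatMap pvKs)) := by
    rw [show (fun (st : PySem.Set String × PySem.Dict String Int) (d : List (String × Int)) =>
          (PySem.Set.ofList (d.map Prod.fst)).foldl
            (fun st f => (PySem.Set.add st.1 f, st.2.modify f 0 (· + 1))) st)
        = (fun (st : PySem.Set String × PySem.Dict String Int) d => (pvKs d).foldl
            (fun st f => (PySem.Set.add st.1 f, st.2.modify f 0 (· + 1))) st) from rfl]
    rw [pv_foldl_flat]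
    rw [PySem.List.foldl_prod_mk (f := PySem.Set.add)
        (g := fun dd x => PySem.Dict.modify dd x 0 (· + 1))]
    rfl
  have hval : (PySem.Dict.counter ((d0 :: rest).flatMap pvKs)).values
      = (PySem.Set.ofList ((d0 :: rest).flatMap pvKs)).map
          (fun k => ((((d0 :: rest).flatMap pvKs).count k : Int))) := by
    show ((PySem.Dict.counter ((d0 :: rest).flatMap pvKs)).items.map Prod.snd) = _
    rw [PySem.Dict.items_counter, List.map_map]
    rfl
  have hBfold : (d0 :: rest).foldl
      (fun (st : PySem.Set String × PySem.Set String × Option (PySem.Set String)) d =>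
        let keys := PySem.Set.ofList (d.map Prod.fst)
        (PySem.Set.union st.1 keys,
         PySem.Set.union st.2.1 (PySem.Set.inter keys st.1),
         some (match st.2.2 with | none => keys | some i => PySem.Set.inter i keys)))
      (PySem.Set.empty, PySem.Set.empty, none)
      = rest.foldl pvBstep
          (PySem.Set.union PySem.Set.empty (pvKs d0),
           PySem.Set.union PySem.Set.empty (PySem.Set.inter (pvKs d0) PySem.Set.empty),
           some (pvKs d0)) := rfl
  obtain ⟨hdupAll, I', hI', hIAll⟩ := pv_bfold_char rest
    (PySem.Set.union PySem.Set.empty (pvKs d0))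
    (PySem.Set.union PySem.Set.empty (PySem.Set.inter (pvKs d0) PySem.Set.empty))
    (pvKs d0)
  have hcnt0 : ∀ f, pvCnt (d0 :: rest) f = (if f ∈ pvKs d0 then 1 else 0) + pvCnt rest f := by
    intro f; by_cases h : f ∈ pvKs d0 <;> simp [pvCnt, h, Nat.add_comm]
  have hdup : ∀ f, f ∈ (rest.foldl pvBstep
      (PySem.Set.union PySem.Set.empty (pvKs d0),
       PySem.Set.union PySem.Set.empty (PySem.Set.inter (pvKs d0) PySem.Set.empty),
       some (pvKs d0))).2.1 ↔ 2 ≤ pvCnt (d0 :: rest) f := by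
    intro f
    rw [hdupAll f, hcnt0 f]
    have hp := pvCnt_pos rest f
    simp only [PySem.Set.mem_union, PySem.Set.mem_inter, PySem.Set.empty, List.not_mem_nil,
      false_or, or_false, and_false]
    by_cases hk : f ∈ pvKs d0 <;> simp [hk]
    · rw [← hp]; omega
  have hIc : ∀ f, f ∈ I' ↔ pvCnt (d0 :: rest) f = (d0 :: rest).length := by
    intro f
    rw [hIAll f, pvCnt_eq_length_iff]
    constructor
    · rintro ⟨hk, hall⟩ d hd
      rcases List.mem_cons.mp hd with rfl | hd
      · exact hk
      · exact hall d hd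
    · intro hall
      exact ⟨hall d0 (List.mem_cons_self), fun d hd => hall d (List.mem_cons_of_mem _ hd)⟩
  have hcount := pv_count_flat (d0 :: rest)
  have hSmem : ∀ f, f ∈ PySem.Set.ofList ((d0 :: rest).flatMap pvKs)
      ↔ 1 ≤ pvCnt (d0 :: rest) f := by
    intro f
    rw [PySem.Set.mem_ofList, List.mem_flatMap, ← pvCnt_pos]
  have hcoreIff : ((((PySem.Set.ofList ((d0 :: rest).flatMap pvKs)).map
        (fun k => ((((d0 :: rest).flatMap pvKs).count k : Int)))).filter
        (fun c => c == ((d0 :: rest).length : Int))).length = 0)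
      ↔ ¬ ∃ f, pvCnt (d0 :: rest) f = (d0 :: rest).length := by
    rw [← List.countP_eq_length_filter, List.countP_map, List.countP_eq_zero]
    constructor
    · rintro h ⟨f, hf⟩
      have hfS : f ∈ PySem.Set.ofList ((d0 :: rest).flatMap pvKs) := (hSmem f).mpr (by omega)
      exact h f hfS (by simp only [Function.comp_apply, hcount f, beq_iff_eq]; exact_mod_cast hf)
    · rintro h f hfS hpred
      simp only [Function.comp_apply, hcount f, beq_iff_eq, Int.natCast_inj] at hpred
      exact h ⟨f, hpred⟩
  have hpartIff : ((((PySem.Set.ofList ((d0 :: rest).flatMap pvKs)).map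
        (fun k => ((((d0 :: rest).flatMap pvKs).count k : Int)))).filter
        (fun c => decide (1 < c) && decide (c < ((d0 :: rest).length : Int)))).length = 0)
      ↔ ¬ ∃ f, 2 ≤ pvCnt (d0 :: rest) f ∧ pvCnt (d0 :: rest) f < (d0 :: rest).length := by
    rw [← List.countP_eq_length_filter, List.countP_map, List.countP_eq_zero]
    constructor
    · rintro h ⟨f, hf1, hf2⟩
      have hfS : f ∈ PySem.Set.ofList ((d0 :: rest).flatMap pvKs) := (hSmem f).mpr (by omega)
      exact h f hfS (by
        simp only [Function.comp_apply, hcount f, Bool.and_eq_true, decide_eq_true_eq]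
        omega)
    · rintro h f hfS hpred
      simp only [Function.comp_apply, hcount f, Bool.and_eq_true, decide_eq_true_eq] at hpred
      exact h ⟨f, by omega, by omega⟩
  have hlen0 : ∀ f, 2 ≤ pvCnt (d0 :: rest) f →
      (PySem.Set.len (PySem.Set.ofList ((d0 :: rest).flatMap pvKs)) == 0) = false := by
    intro f h
    have hfS : f ∈ PySem.Set.ofList ((d0 :: rest).flatMap pvKs) := (hSmem f).mpr (by omega)
    have hne := List.ne_nil_of_mem hfS
    simp only [PySem.Set.len, beq_eq_false_iff_ne, ne_eq]
    intro hzero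
    exact hne (List.length_eq_zero_iff.mp (by exact_mod_cast hzero))
  have hdiffIff : (PySem.Set.diff ((rest.foldl pvBstep
      (PySem.Set.union PySem.Set.empty (pvKs d0),
       PySem.Set.union PySem.Set.empty (PySem.Set.inter (pvKs d0) PySem.Set.empty),
       some (pvKs d0))).2.1) I').isEmpty = true
      ↔ ¬ ∃ f, 2 ≤ pvCnt (d0 :: rest) f ∧ pvCnt (d0 :: rest) f < (d0 :: rest).length := by
    rw [List.isEmpty_iff, List.eq_nil_iff_forall_not_mem]
    constructor
    · rintro h ⟨f, hf1, hf2⟩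
      refine h f ((PySem.Set.mem_diff _ _ f).mpr ⟨(hdup f).mpr hf1, fun hfI => ?_⟩)
      have := (hIc f).mp hfI
      omega
    · rintro h f hfd
      obtain ⟨hfdup, hfI⟩ := (PySem.Set.mem_diff _ _ f).mp hfd
      have h1 := (hdup f).mp hfdup
      have h2 : pvCnt (d0 :: rest) f ≠ (d0 :: rest).length := fun he => hfI ((hIc f).mpr he)
      have h3 := pvCnt_le (d0 :: rest) f
      exact h ⟨f, h1, by omega⟩
  have hIiff : I'.isEmpty = true ↔ ¬ ∃ f, pvCnt (d0 :: rest) f = (d0 :: rest).length := by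
    rw [List.isEmpty_iff, List.eq_nil_iff_forall_not_mem]
    constructor
    · rintro h ⟨f, hf⟩
      exact h f ((hIc f).mpr hf)
    · rintro h f hf
      exact h ⟨f, (hIc f).mp hf⟩
  rw [hBfold, hI']
  simp only [hfold, hval]
  by_cases hd : (PySem.Set.diff ((rest.foldl pvBstep
      (PySem.Set.union PySem.Set.empty (pvKs d0),
       PySem.Set.union PySem.Set.empty (PySem.Set.inter (pvKs d0) PySem.Set.empty),
       some (pvKs d0))).2.1) I').isEmpty = true
  · have hP := hdiffIff.mp hd
    rw [hpartIff.mpr hP, hd]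
    simp
  · have e4 : (PySem.Set.diff ((rest.foldl pvBstep
      (PySem.Set.union PySem.Set.empty (pvKs d0),
       PySem.Set.union PySem.Set.empty (PySem.Set.inter (pvKs d0) PySem.Set.empty),
       some (pvKs d0))).2.1) I').isEmpty = false := by
      cases hx : (PySem.Set.diff ((rest.foldl pvBstep
      (PySem.Set.union PySem.Set.empty (pvKs d0),
       PySem.Set.union PySem.Set.empty (PySem.Set.inter (pvKs d0) PySem.Set.empty),
       some (pvKs d0))).2.1) I').isEmpty
      · rfl
      · exact absurd hx hd
    have hP : ∃ f, 2 ≤ pvCnt (d0 :: rest) f ∧ pvCnt (d0 :: rest) f < (d0 :: rest).length := by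
      by_contra h
      exact hd (hdiffIff.mpr h)
    obtain ⟨f0, hf0⟩ := hP
    have hL := hlen0 f0 hf0.1
    have h1 : ¬ (((((PySem.Set.ofList ((d0 :: rest).flatMap pvKs)).map
        (fun k => ((((d0 :: rest).flatMap pvKs).count k : Int)))).filter
        (fun c => decide (1 < c) && decide (c < ((d0 :: rest).length : Int)))).length) = 0) := fun h => (hpartIff.mp h) ⟨f0, hf0⟩
    rw [hL, e4, beq_eq_false_iff_ne.mpr h1]
    by_cases hi : I'.isEmpty = true
    · rw [hcoreIff.mpr (hIiff.mp hi), hi]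
      simp
    · have e5 : I'.isEmpty = false := by
        cases hx : I'.isEmpty
        · rfl
        · exact absurd hx hi
      have hC : ∃ f, pvCnt (d0 :: rest) f = (d0 :: rest).length := by
        by_contra h
        exact hi (hIiff.mpr h)
      have h2 : ¬ (((((PySem.Set.ofList ((d0 :: rest).flatMap pvKs)).map
        (fun k => ((((d0 :: rest).flatMap pvKs).count k : Int)))).filter
        (fun c => c == ((d0 :: rest).length : Int))).length) = 0) := fun h => (hcoreIff.mp h) hC
      rw [e5, beq_eq_false_iff_ne.mpr h2]
      simp
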